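-- pv_equiv track=rewrite | github.com/comp110-25s/comp110-workspace-arpitr-web | exercises/ex03/dictionary.py | count
-- ===== SOURCE A (Python) =====
-- def count(input: list[str]) -> dict[str, int]:
--     """To count the number of times a value has appeared"""
--     temp: dict[str, int] = {}
--     i = 0
--     while i < len(input):
--         key = input[i]
--         if key in temp:
--             temp[key] += 1
--         else:
--             temp[key] = 1
--         i += 1
--     return temp
-- ===== SOURCE B (Python) =====
-- def count(input: list[str]) -> dict[str, int]:
--     """To count the number of times a value has appeared"""
--     return {key: input.count(key) for key in dict.fromkeys(input)}
-- ===== Notes on version B (the rewrite author's own statement) =====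
-- stated objective: simpler
-- what changed: Replaces the index-driven while loop that increments a running counter per element with a comprehension over the distinct keys (ordered dedup) that rescans the list once per key via list.count.
import Mathlib
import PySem

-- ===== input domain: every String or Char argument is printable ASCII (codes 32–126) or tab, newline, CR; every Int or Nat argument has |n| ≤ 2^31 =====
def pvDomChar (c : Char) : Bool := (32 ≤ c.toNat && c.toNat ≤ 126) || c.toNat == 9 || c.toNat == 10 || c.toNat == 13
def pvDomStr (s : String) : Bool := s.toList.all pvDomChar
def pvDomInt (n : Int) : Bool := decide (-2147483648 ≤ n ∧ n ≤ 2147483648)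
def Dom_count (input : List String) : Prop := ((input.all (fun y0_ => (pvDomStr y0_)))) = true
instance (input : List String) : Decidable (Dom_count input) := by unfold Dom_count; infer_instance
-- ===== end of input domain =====

-- ===== PORT A =====
-- B: comprehension over the distinct keys (dict.fromkeys order) with list.count per key,
-- instead of A's index-driven while loop incrementing a running counter. Return value only.
def count (input : List String) : List (String × Int) :=
  -- while i < len(input): key = input[i]; if key in temp: temp[key] += 1 else: temp[key] = 1
  ((PySem.List.pyRange 0 (PySem.List.len input) 1).foldl
    (fun temp i =>
      -- key = input[i]
      if temp.contains (PySem.List.pyGetD input i "")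
      then temp.insert (PySem.List.pyGetD input i "") (temp.getD (PySem.List.pyGetD input i "") 0 + 1)
      else temp.insert (PySem.List.pyGetD input i "") 1)
    PySem.Dict.empty).items

-- ===== PORT B =====
def count_alt (input : List String) : List (String × Int) :=
  -- {key: input.count(key) for key in dict.fromkeys(input)}
  (PySem.List.dedup input).map (fun key => (key, (PySem.List.count input key : Int)))

-- ===== PRECONDITION & SPEC =====
def Spec_count (input : List String) (out : List (String × Int)) : Prop := out = count_alt input
instance (input : List String) (out : List (String × Int)) : Decidable (Spec_count input out) := by unfold Spec_count; infer_instance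

-- ===== CLAIM (what is proved, stated in full; the proofs are below) =====
def Claim_equal_count : Prop := ∀ (input : List String), Dom_count input → Spec_count input (count input)

-- ===== LEMMAS AND PROOFS =====

-- ===== VERDICT (by name: the statement is the Claim_ definition above) =====
lemma count_step_eq :
    (fun (temp : PySem.Dict String Int) (key : String) =>
      if temp.contains key then temp.insert key (temp.getD key 0 + 1)
      else temp.insert key 1) =
    (fun (temp : PySem.Dict String Int) (key : String) =>
      temp.insert key (temp.getD key 0 + 1)) := by
  funext temp key
  by_cases h : temp.contains key = true
  · simp [h]
  · have h0 : temp.getD key 0 = 0 := by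
      have := PySem.Dict.contains_eq_isSome_get? (d := temp) (k := key)
      cases hg : temp.get? key with
      | none => simp [PySem.Dict.getD, hg]
      | some v => rw [hg] at this; simp [this] at h
    simp [h, h0]

theorem count_spec : Claim_equal_count := by
  intro input _
  unfold Spec_count count count_alt
  rw [PySem.List.foldl_pyRange_zero_pyGetD input ""
      (fun (temp : PySem.Dict String Int) key =>
        if temp.contains key then temp.insert key (temp.getD key 0 + 1)
        else temp.insert key 1) PySem.Dict.empty]
  rw [count_step_eq, PySem.Dict.foldl_insert_getD_add_one_eq_counter,
      PySem.Dict.items_counter]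
  simp [PySem.List.count]
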